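-- pv_equiv track=rewrite | github.com/merc-devel/merc | merc/util.py | uidify
-- ===== SOURCE A (Python) =====
-- ID_BASE = "ABCDEFGHIJKLMNOPQRSTUVWXYZ0123456789"
--
-- def uidify(i):
--   MAX_LENGTH = 6
--
--   parts = []
--
--   while i > 0:
--     parts.append(ID_BASE[i % len(ID_BASE)])
--     i //= len(ID_BASE)
--
--   parts.reverse()
--
--   if len(parts) > MAX_LENGTH:
--     raise ValueError("number does not convert to a uid")
--
--   return "".join(parts).rjust(MAX_LENGTH, "A")
-- ===== SOURCE B (Python) =====
-- ID_BASE = "ABCDEFGHIJKLMNOPQRSTUVWXYZ0123456789"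
--
-- def uidify(i):
--   if i <= 0:
--     return "AAAAAA"
--   base = len(ID_BASE)
--   if i >= base ** 6:
--     raise ValueError("number does not convert to a uid")
--   return "".join(ID_BASE[(i // base ** pos) % base] for pos in range(5, -1, -1))
-- ===== Notes on version B (the rewrite author's own statement) =====
-- stated objective: simpler
-- what changed: Replaces the low-to-high digit-extraction loop with list append, reverse and rjust padding by a guarded fixed-count high-to-low positional extraction (ID_BASE[(i // 36**pos) % 36] for pos 5..0), where leading zeros are naturally 'A'; no list accumulation, reversal or justification.
import Mathlib
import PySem

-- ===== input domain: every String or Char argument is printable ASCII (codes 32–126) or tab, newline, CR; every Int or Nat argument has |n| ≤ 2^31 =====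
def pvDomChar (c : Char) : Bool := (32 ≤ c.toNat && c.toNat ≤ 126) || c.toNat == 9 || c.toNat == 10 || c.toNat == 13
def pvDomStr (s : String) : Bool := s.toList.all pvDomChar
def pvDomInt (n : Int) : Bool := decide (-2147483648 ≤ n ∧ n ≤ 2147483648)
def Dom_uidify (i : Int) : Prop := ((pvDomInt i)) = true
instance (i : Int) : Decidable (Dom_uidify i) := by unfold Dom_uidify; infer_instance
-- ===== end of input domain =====

-- B replaces A's extract-low-digits / reverse / rjust pipeline by a fixed six-position
-- high-to-low extraction with guards; equal return value on all inputs where A returns.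

-- ===== PORT A =====
def idBase : List Char := "ABCDEFGHIJKLMNOPQRSTUVWXYZ0123456789".toList

-- the 'while i > 0' loop: appends ID_BASE[i % 36] and floor-divides i by 36
def uidifyLoop (i : Int) (parts : List Char) : List Char :=
  if _h : i > 0 then
    uidifyLoop (PySem.Int.floordiv i (idBase.length : Int))
      (parts ++ [(PySem.List.pyGet? idBase (PySem.Int.mod i (idBase.length : Int))).getD 'A'])
  else parts
termination_by i.toNat
decreasing_by
  have h36 : (idBase.length : Int) = 36 := by decide
  rw [h36, PySem.Int.floordiv_eq_ediv_of_pos (by norm_num)]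
  omega

def uidify (i : Int) : String :=
  let parts := (uidifyLoop i []).reverse
  if parts.length > 6 then ""   -- Python raises ValueError here; excluded by Pre_uidify
  else String.mk (List.replicate (6 - parts.length) 'A' ++ parts)   -- "".join(parts).rjust(6, "A")

-- ===== PORT B =====
def uidify_alt (i : Int) : String :=
  if i ≤ 0 then "AAAAAA"
  else if i ≥ (idBase.length : Int) ^ 6 then ""   -- Python raises ValueError here; excluded by Pre_uidify
  else String.mk ((PySem.List.pyRange 5 (-1) (-1)).map fun pos =>
    -- pos ∈ range(5,-1,-1) is nonnegative, so 36 ** pos is (36:Int) ^ pos.toNat (exact)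
    (PySem.List.pyGet? idBase
      (PySem.Int.mod (PySem.Int.floordiv i ((idBase.length : Int) ^ pos.toNat)) (idBase.length : Int))).getD 'A')

-- ===== PRECONDITION & SPEC =====
-- Pre_ excludes exactly the inputs where A raises ValueError (i ≥ 36^6, a seven-digit
-- base-36 number); these all lie outside Dom_uidify anyway, since 36^6 > 2^31.
def Pre_uidify (i : Int) : Prop := i < 2176782336
instance (i : Int) : Decidable (Pre_uidify i) := by unfold Pre_uidify; infer_instance
def pvWitness_uidify : Int := 37
def Spec_uidify (i : Int) (out : String) : Prop := out = uidify_alt i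
instance (i : Int) (out : String) : Decidable (Spec_uidify i out) := by unfold Spec_uidify; infer_instance

-- ===== CLAIM (what is proved, stated in full; the proofs are below) =====
def Claim_equal_uidify : Prop := ∀ (i : Int), Dom_uidify i → Pre_uidify i → Spec_uidify i (uidify i)

-- ===== LEMMAS AND PROOFS =====

-- high-to-low digit list of length k (the value B computes for k = 6)
def hiDigits (k : Nat) (i : Int) : List Char :=
  (List.range k).reverse.map fun p =>
    (PySem.List.pyGet? idBase (PySem.Int.mod (PySem.Int.floordiv i ((36:Int) ^ p)) 36)).getD 'A'

theorem uidifyLoop_acc (i : Int) (acc : List Char) :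
    uidifyLoop i acc = acc ++ uidifyLoop i [] := by
  conv_lhs => rw [uidifyLoop]
  conv_rhs => rw [uidifyLoop]
  by_cases h : i > 0
  · simp only [h, dite_true]
    rw [uidifyLoop_acc _ (acc ++ _), uidifyLoop_acc _ ([] ++ _)]
    simp
  · simp [h]
termination_by i.toNat
decreasing_by
  all_goals
    have h36 : (idBase.length : Int) = 36 := by decide
    rw [h36, PySem.Int.floordiv_eq_ediv_of_pos (by norm_num)]
    omega

theorem uidifyLoop_len (k : Nat) (i : Int) (h0 : 0 ≤ i) (h1 : i < 36 ^ k) :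
    (uidifyLoop i []).length ≤ k := by
  induction k generalizing i with
  | zero =>
    have hi : ¬ i > 0 := by norm_num at h1; omega
    rw [uidifyLoop]; simp [hi]
  | succ k ih =>
    by_cases h : i > 0
    · rw [uidifyLoop]
      simp only [h, dite_true]
      rw [uidifyLoop_acc]
      have h36 : (idBase.length : Int) = 36 := by decide
      rw [h36, PySem.Int.floordiv_eq_ediv_of_pos (by norm_num)]
      have hj0 : 0 ≤ i / 36 := Int.ediv_nonneg h0 (by norm_num)
      have hj1 : i / 36 < 36 ^ k := by
        have h2 : i < 36 ^ k * 36 := by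
          calc i < 36 ^ (k + 1) := h1
          _ = 36 ^ k * 36 := by ring
        omega
      have := ih (i / 36) hj0 hj1
      simp
      omega
    · rw [uidifyLoop]; simp [h]

theorem hiDigits_zero (k : Nat) : hiDigits k 0 = List.replicate k 'A' := by
  refine List.eq_replicate_iff.mpr ⟨by simp [hiDigits], ?_⟩
  intro b hb
  simp only [hiDigits, List.mem_map, List.mem_reverse, List.mem_range] at hb
  obtain ⟨p, hp, rfl⟩ := hb
  rw [PySem.Int.floordiv_eq_ediv_of_pos (by positivity), Int.zero_ediv]
  decide

theorem hiDigits_succ (k : Nat) (i : Int) (h0 : 0 ≤ i) :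
    hiDigits (k + 1) i
      = hiDigits k (i / 36)
        ++ [(PySem.List.pyGet? idBase (PySem.Int.mod i 36)).getD 'A'] := by
  unfold hiDigits
  have hrev : (List.range (k + 1)).reverse
      = ((List.range k).reverse.map Nat.succ) ++ [0] := by
    rw [List.range_succ_eq_map]; simp [List.map_reverse]
  rw [hrev, List.map_append, List.map_map]
  congr 1
  · refine List.map_congr_left ?_
    intro p hp
    simp only [Function.comp_apply]
    congr 2
    rw [PySem.Int.floordiv_eq_ediv_of_pos (by positivity),
        PySem.Int.floordiv_eq_ediv_of_pos (by positivity),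
        show ((36:Int) ^ Nat.succ p) = 36 * 36 ^ p from by rw [pow_succ, Int.mul_comm],
        ← Int.ediv_ediv_of_nonneg (by norm_num)]
  · simp only [List.map_cons, List.map_nil, pow_zero]
    congr 2
    rw [PySem.Int.floordiv_eq_ediv_of_pos (by norm_num)]
    simp

theorem uidifyLoop_hi (k : Nat) (i : Int) (h0 : 0 ≤ i) (h1 : i < 36 ^ k) :
    List.replicate (k - (uidifyLoop i []).length) 'A' ++ (uidifyLoop i []).reverse
      = hiDigits k i := by
  induction k generalizing i with
  | zero =>
    have hi : ¬ i > 0 := by norm_num at h1; omega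
    rw [uidifyLoop]; simp [hi, hiDigits]
  | succ k ih =>
    by_cases h : i > 0
    · -- peel one loop iteration and the last digit of hiDigits
      have h36 : (idBase.length : Int) = 36 := by decide
      rw [uidifyLoop]
      simp only [h, dite_true, h36]
      rw [uidifyLoop_acc, PySem.Int.floordiv_eq_ediv_of_pos (by norm_num)]
      have hj0 : 0 ≤ i / 36 := Int.ediv_nonneg h0 (by norm_num)
      have hj1 : i / 36 < 36 ^ k := by
        have h2 : i < 36 ^ k * 36 := by
          calc i < 36 ^ (k + 1) := h1
          _ = 36 ^ k * 36 := by ring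
        omega
      have hlen := uidifyLoop_len k (i / 36) hj0 hj1
      rw [hiDigits_succ k i h0, ← ih (i / 36) hj0 hj1]
      simp only [List.nil_append, List.singleton_append, List.length_cons,
        List.reverse_cons]
      rw [show k + 1 - ((uidifyLoop (i / 36) []).length + 1)
            = k - (uidifyLoop (i / 36) []).length from by omega]
      simp
    · have hi0 : i = 0 := by omega
      subst hi0
      rw [uidifyLoop]
      simp only [show ¬ (0:Int) > 0 from by omega, dite_false]
      rw [hiDigits_zero]
      simp

-- ===== VERDICT (by name: the statement is the Claim_ definition above) =====
theorem uidify_spec : Claim_equal_uidify := by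
  intro i hdom hpre
  unfold Spec_uidify
  by_cases h : i ≤ 0
  · rw [uidify, uidify_alt, uidifyLoop]
    simp only [show ¬ i > 0 from by omega, dite_false, h, ite_true]
    decide
  · have h0 : 0 ≤ i := by omega
    have h1 : i < 36 ^ 6 := by unfold Pre_uidify at hpre; norm_num; omega
    have hlen := uidifyLoop_len 6 i h0 h1
    have hmain := uidifyLoop_hi 6 i h0 h1
    rw [uidify, uidify_alt]
    simp only [show ¬ i ≤ 0 from h, ite_false,
      show ¬ i ≥ (idBase.length : Int) ^ 6 from by
        have : (idBase.length : Int) = 36 := by decide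
        rw [this]; omega, ite_false]
    simp only [List.length_reverse]
    rw [if_neg (by omega)]
    rw [hmain]
    rw [show PySem.List.pyRange 5 (-1) (-1) = [5, 4, 3, 2, 1, 0] from by decide]
    have h36 : (idBase.length : Int) = 36 := by decide
    simp [hiDigits, List.range_succ, h36]
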